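-- pv_equiv track=rewrite | github.com/maxenceLe-brun/runtrack-python | jour04/job14/main.py | my_long_word
-- ===== SOURCE A (Python) =====
-- def my_long_word(n, word):
--     allwords = [""]
--     printing = ""
--     for a in word:
--         if a == " ":
--             allwords += [" "]
--         else:
--             allwords[-1] += a
--     for b in allwords:
--         N = 0
--         for c in b:
--             N+=1
--         if N > n+1:
--             printing += b+" "
--     return printing
-- ===== SOURCE B (Python) =====
-- def my_long_word(n, word):
--     # Segment the string at its space positions: each segment runs from one
--     # boundary (a space position, or 0) to the next (or the end of the string).
--     spaces = [i for i, c in enumerate(word) if c == " "]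
--     out = ""
--     for s, e in zip([0] + spaces, spaces + [len(word)]):
--         seg = word[s:e]
--         if len(seg) > n + 1:
--             out += seg + " "
--     return out
-- ===== Notes on version B (the rewrite author's own statement) =====
-- stated objective: faster
-- what changed: Replaces the char-by-char state machine (which grows the last token with allwords[-1] += a and counts each token's length with an inner loop) with a boundary-based segmentation: collect the space positions once, then slice the string between consecutive boundaries and filter by len(seg) > n+1.
import Mathlib
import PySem

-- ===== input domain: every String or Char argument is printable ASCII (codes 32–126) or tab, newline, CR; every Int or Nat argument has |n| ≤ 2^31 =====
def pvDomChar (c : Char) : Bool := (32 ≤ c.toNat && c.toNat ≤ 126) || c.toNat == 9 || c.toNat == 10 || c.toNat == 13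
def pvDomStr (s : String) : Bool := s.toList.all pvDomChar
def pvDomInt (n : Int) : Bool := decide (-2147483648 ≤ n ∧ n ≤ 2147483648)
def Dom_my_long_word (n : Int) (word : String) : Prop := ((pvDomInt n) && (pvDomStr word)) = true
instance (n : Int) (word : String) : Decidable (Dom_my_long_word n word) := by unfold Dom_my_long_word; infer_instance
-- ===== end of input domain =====

-- B replaces A's char-by-char token state machine and inner counting loop with a
-- boundary-based segmentation (space positions -> zip -> slices); objective: faster
-- (measured).


-- ===== PORT A =====
-- allwords[-1] += a : append the char to the last element (allwords is never empty in A)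
def pvAddLast (ws : List (List Char)) (c : Char) : List (List Char) :=
  match ws with
  | [] => []
  | [w] => [w ++ [c]]
  | w :: rest => w :: pvAddLast rest c

def my_long_word (n : Int) (word : String) : String :=
  let allwords : List (List Char) :=
    word.toList.foldl
      (fun aw a => if a == ' ' then aw ++ [[' ']] else pvAddLast aw a) [[]]
  let printing : List Char :=
    allwords.foldl
      (fun pr b =>
        let N : Int := b.foldl (fun N _ => N + 1) 0
        if N > n + 1 then pr ++ b ++ [' '] else pr) []
  String.ofList printing

-- ===== PORT B =====
def my_long_word_alt (n : Int) (word : String) : String :=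
  let cs := word.toList
  let spaces : List Int :=
    (PySem.List.enumerate cs).filterMap (fun ic => if ic.2 == ' ' then some ic.1 else none)
  String.ofList
    (((0 :: spaces).zip (spaces ++ [(cs.length : Int)])).foldl
      (fun out se =>
        let seg := PySem.List.slice cs (some se.1) (some se.2)
        if ((seg.length : Int) > n + 1) then out ++ seg ++ [' '] else out) [])

-- ===== PRECONDITION & SPEC =====
def Spec_my_long_word (n : Int) (word : String) (out : String) : Prop := out = my_long_word_alt n word
instance (n : Int) (word : String) (out : String) : Decidable (Spec_my_long_word n word out) := by unfold Spec_my_long_word; infer_instance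

-- ===== CLAIM (what is proved, stated in full; the proofs are below) =====
def Claim_equal_my_long_word : Prop := ∀ (n : Int) (word : String), Dom_my_long_word n word → Spec_my_long_word n word (my_long_word n word)

-- ===== LEMMAS AND PROOFS =====

-- the token list A's first loop builds, as a recursion on the remaining characters
def pvTok (w : List Char) : List Char → List (List Char)
  | [] => [w]
  | c :: cs => if c == ' ' then w :: pvTok [' '] cs else pvTok (w ++ [c]) cs

-- the positions of the spaces of cs
def pvSp : List Char → List Nat
  | [] => []
  | c :: cs => if c = ' ' then 0 :: (pvSp cs).map (· + 1) else (pvSp cs).map (· + 1)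

-- B's segment list, at the Nat level
def pvSeg (cs : List Char) : List (List Char) :=
  ((0 :: pvSp cs).zip (pvSp cs ++ [cs.length])).map (fun p => (cs.drop p.1).take (p.2 - p.1))

theorem pvAddLast_append (ws : List (List Char)) (w : List Char) (c : Char) :
    pvAddLast (ws ++ [w]) c = ws ++ [w ++ [c]] := by
  induction ws with
  | nil => rfl
  | cons x xs ih =>
    cases xs with
    | nil => simp [pvAddLast]
    | cons y ys => simp [pvAddLast] at ih ⊢; exact ih

theorem foldA_eq_tok (cs : List Char) (ws : List (List Char)) (w : List Char) :
    cs.foldl (fun aw a => if a == ' ' then aw ++ [[' ']] else pvAddLast aw a) (ws ++ [w])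
      = ws ++ pvTok w cs := by
  induction cs generalizing ws w with
  | nil => simp [pvTok]
  | cons c cs ih =>
    simp only [List.foldl_cons]
    by_cases h : (c == ' ') = true
    · rw [if_pos h, ih (ws ++ [w]) [' ']]
      simp [pvTok, h]
    · rw [if_neg h, pvAddLast_append, ih]
      simp [pvTok, h]

theorem count_eq_length (b : List Char) (k : Int) :
    b.foldl (fun N _ => N + 1) k = k + b.length := by
  induction b generalizing k with
  | nil => simp
  | cons x xs ih => simp [ih]; omega

-- structural equations for pvSp
theorem pvSp_cons_space (t : List Char) : pvSp (' ' :: t) = 0 :: (pvSp t).map (· + 1) := by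
  simp [pvSp]

theorem pvSp_cons_nonspace (c : Char) (t : List Char) (h : ¬ c = ' ') :
    pvSp (c :: t) = (pvSp t).map (· + 1) := by
  simp [pvSp, h]

-- the enumerate/filterMap of the port computes pvSp (shifted by the start offset)
theorem filterMap_enumerate_eq_sp (cs : List Char) (k : Nat) :
    (PySem.List.enumerate cs (k : Nat)).filterMap
        (fun ic => if ic.2 == ' ' then some ic.1 else none)
      = (pvSp cs).map (fun j => ((j + k : Nat) : Int)) := by
  induction cs generalizing k with
  | nil => simp [PySem.List.enumerate_nil, pvSp]
  | cons c cs ih =>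
    rw [PySem.List.enumerate_cons]
    have h1 : ((k : Nat) : Int) + 1 = ((k + 1 : Nat) : Int) := by push_cast; ring
    have hstep : ∀ (l : List (Int × Char)),
        List.filterMap (fun ic : Int × Char => if ic.2 == ' ' then some ic.1 else none)
            ((((k : Nat) : Int), c) :: l)
          = (if c = ' ' then [((k : Nat) : Int)] else [])
              ++ List.filterMap (fun ic : Int × Char => if ic.2 == ' ' then some ic.1 else none) l := by
      intro l
      by_cases h : c = ' ' <;> simp [h]
    rw [hstep, h1, ih (k + 1)]
    by_cases h : c = ' '
    · rw [if_pos h, h, pvSp_cons_space, List.map_cons, List.map_map]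
      simp only [List.singleton_append]
      congr 1
      · simp
      · congr 1
        funext j
        simp only [Function.comp_apply]
        omega
    · rw [if_neg h, pvSp_cons_nonspace c cs h, List.map_map]
      simp only [List.nil_append]
      congr 1
      funext j
      simp only [Function.comp_apply]
      omega

-- shifting both indices by one and consing a char leaves the slices unchanged
theorem zip_map_succ_slice (c : Char) (t : List Char) (l1 l2 : List Nat) :
    ((l1.map (· + 1)).zip (l2.map (· + 1))).map
        (fun p => ((c :: t).drop p.1).take (p.2 - p.1))
      = (l1.zip l2).map (fun p => (t.drop p.1).take (p.2 - p.1)) := by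
  rw [List.zip_map, List.map_map]
  congr 1
  funext p
  simp [Nat.succ_sub_succ]

theorem pvSeg_cons_nonspace (c : Char) (t : List Char) (h : ¬ c = ' ') :
    pvSeg (c :: t) = (c :: (pvSeg t).headI) :: (pvSeg t).tail := by
  unfold pvSeg
  rw [pvSp_cons_nonspace c t h]
  simp only [List.length_cons]
  have hms : (pvSp t).map (· + 1) ++ [t.length + 1] = (pvSp t ++ [t.length]).map (· + 1) := by
    simp
  rcases hL : pvSp t ++ [t.length] with _ | ⟨d, L'⟩
  · exact absurd hL (by simp)
  · rw [hms, hL]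
    simp only [List.map_cons, List.zip_cons_cons, List.map_cons]
    rw [zip_map_succ_slice]
    simp [List.take_succ_cons]

theorem pvSeg_cons_space (t : List Char) :
    pvSeg (' ' :: t) = [] :: (' ' :: (pvSeg t).headI) :: (pvSeg t).tail := by
  unfold pvSeg
  rw [pvSp_cons_space]
  simp only [List.length_cons, List.cons_append, List.zip_cons_cons, List.map_cons]
  have hms : (pvSp t).map (· + 1) ++ [t.length + 1] = (pvSp t ++ [t.length]).map (· + 1) := by
    simp
  rcases hL : pvSp t ++ [t.length] with _ | ⟨d, L'⟩
  · exact absurd hL (by simp)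
  · rw [hms, hL]
    simp only [List.map_cons, List.zip_cons_cons, List.map_cons]
    rw [zip_map_succ_slice]
    simp [List.take_succ_cons]

theorem tok_eq_seg (cs : List Char) (w : List Char) :
    pvTok w cs = (w ++ (pvSeg cs).headI) :: (pvSeg cs).tail := by
  induction cs generalizing w with
  | nil => simp [pvTok, pvSeg, pvSp]
  | cons c t ih =>
    by_cases h : c = ' '
    · subst h
      rw [pvSeg_cons_space]
      simp only [pvTok, beq_self_eq_true]
      rw [ih [' ']]
      simp
    · rw [pvSeg_cons_nonspace c t h]
      simp only [pvTok, beq_iff_eq, if_neg h]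
      rw [ih (w ++ [c])]
      simp

theorem pvSeg_ne_nil (cs : List Char) : pvSeg cs ≠ [] := by
  unfold pvSeg
  rcases hL : pvSp cs ++ [cs.length] with _ | ⟨d, L'⟩
  · exact absurd hL (by simp)
  · simp

-- ===== VERDICT (by name: the statement is the Claim_ definition above) =====
theorem my_long_word_spec : Claim_equal_my_long_word := by
  intro n word _
  show my_long_word n word = my_long_word_alt n word
  unfold my_long_word my_long_word_alt
  dsimp only
  -- A's token list is pvTok [] cs
  have h1 := foldA_eq_tok word.toList [] []
  simp only [List.nil_append] at h1
  rw [h1]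
  -- and pvTok [] cs is exactly B's segment list
  have h2 := tok_eq_seg word.toList []
  simp only [List.nil_append] at h2
  have h3 : pvTok [] word.toList = pvSeg word.toList := by
    rw [h2]
    cases hS : pvSeg word.toList with
    | nil => exact absurd hS (pvSeg_ne_nil word.toList)
    | cons a l => simp
  rw [h3]
  -- B's spaces list is the Nat-level pvSp, cast to Int
  have hsp := filterMap_enumerate_eq_sp word.toList 0
  simp only [Nat.add_zero, Nat.cast_zero] at hsp
  rw [hsp]
  -- push the casts out of the zip, turn the Int fold into a fold over pvSeg
  have hzip : (((0 : Int) :: (pvSp word.toList).map (fun j : Nat => (j : Int))).zip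
        ((pvSp word.toList).map (fun j : Nat => (j : Int)) ++ [(word.toList.length : Int)]))
      = ((0 :: pvSp word.toList).zip (pvSp word.toList ++ [word.toList.length])).map
          (fun p : Nat × Nat => ((p.1 : Int), (p.2 : Int))) := by
    have hap : (pvSp word.toList).map (fun j : Nat => (j : Int)) ++ [(word.toList.length : Int)]
        = (pvSp word.toList ++ [word.toList.length]).map (fun j : Nat => (j : Int)) := by
      simp
    have h0 : ((0 : Int) :: (pvSp word.toList).map (fun j : Nat => (j : Int)))
        = (0 :: pvSp word.toList).map (fun j : Nat => (j : Int)) := by simp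
    rw [hap, h0, List.zip_map]
    congr 1
  rw [hzip, List.foldl_map]
  unfold pvSeg
  rw [List.foldl_map]
  simp [PySem.List.slice_natCast, count_eq_length]
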